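-- pv_equiv track=rewrite | github.com/LimiXs/practice_stepik | some scripts/v_mendeleev/atom.py | get_electron_shells
-- ===== SOURCE A (Python) =====
-- def get_electron_shells(electrons):
--     shells = [2, 8, 18, 32, 32, 18, 8]  # Максимальные числа электронов на уровнях
--     electron_distribution = []
--     for shell in shells:
--         if electrons > 0:
--             electrons_in_shell = min(shell, electrons)
--             electron_distribution.append(electrons_in_shell)
--             electrons -= electrons_in_shell
--         else:
--             electron_distribution.append(0)
--     return electron_distribution
-- ===== SOURCE B (Python) =====
-- def get_electron_shells(electrons):
--     caps = [2, 8, 18, 32, 32, 18, 8]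
--     offsets = []
--     total = 0
--     for c in caps:
--         offsets.append(total)
--         total += c
--     return [max(0, min(c, electrons - off)) for c, off in zip(caps, offsets)]
-- ===== Notes on version B (the rewrite author's own statement) =====
-- stated objective: alternative
-- what changed: Replaces the stateful greedy loop that mutates a running electron counter with a precomputed prefix-sum offset table and an independent per-shell closed form max(0, min(cap, electrons - offset)).
import Mathlib
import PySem

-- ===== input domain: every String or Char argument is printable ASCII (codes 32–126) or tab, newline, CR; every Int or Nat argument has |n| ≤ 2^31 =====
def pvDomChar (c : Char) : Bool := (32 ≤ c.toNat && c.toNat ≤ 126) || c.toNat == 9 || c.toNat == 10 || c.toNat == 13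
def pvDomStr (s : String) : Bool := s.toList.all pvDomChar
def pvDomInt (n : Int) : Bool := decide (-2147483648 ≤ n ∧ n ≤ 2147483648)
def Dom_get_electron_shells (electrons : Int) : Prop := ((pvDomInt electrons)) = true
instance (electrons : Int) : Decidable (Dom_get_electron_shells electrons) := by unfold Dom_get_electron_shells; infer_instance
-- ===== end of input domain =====

-- B replaces A's stateful greedy loop by a prefix-sum offset table and an independent
-- per-shell closed form max(0, min(cap, electrons - offset)); objective: alternative decomposition.
-- ===== PORT A =====
def get_electron_shells (electrons : Int) : List Int :=
  (([2, 8, 18, 32, 32, 18, 8] : List Int).foldl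
    (fun (st : Int × List Int) shell =>
      if st.1 > 0 then
        let e := min shell st.1
        (st.1 - e, st.2 ++ [e])
      else (st.1, st.2 ++ [0]))
    (electrons, [])).2

-- ===== PORT B =====
def get_electron_shells_alt (electrons : Int) : List Int :=
  let caps : List Int := [2, 8, 18, 32, 32, 18, 8]
  let offsets := (caps.foldl (fun (st : Int × List Int) c => (st.1 + c, st.2 ++ [st.1])) (0, [])).2
  (caps.zip offsets).map (fun p => max 0 (min p.1 (electrons - p.2)))

-- ===== PRECONDITION & SPEC =====
def Spec_get_electron_shells (electrons : Int) (out : List Int) : Prop := out = get_electron_shells_alt electrons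
instance (electrons : Int) (out : List Int) : Decidable (Spec_get_electron_shells electrons out) := by unfold Spec_get_electron_shells; infer_instance

-- ===== CLAIM (what is proved, stated in full; the proofs are below) =====
def Claim_equal_get_electron_shells : Prop := ∀ (electrons : Int), Dom_get_electron_shells electrons → Spec_get_electron_shells electrons (get_electron_shells electrons)

-- ===== LEMMAS AND PROOFS =====

-- capacities paired with their prefix-sum offsets, starting offset t
def pvOffs (t : Int) : List Int → List (Int × Int)
  | [] => []
  | c :: cs => (c, t) :: pvOffs (t + c) cs

-- Invariant: the running electron counter e satisfies max e 0 = max (E - t) 0, where E is the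
-- original count and t the capacity consumed so far; then A's greedy fold equals B's closed form.
theorem pvFoldA_eq (caps : List Int) (hpos : ∀ c ∈ caps, 0 < c) :
    ∀ (e E t : Int) (acc : List Int), max e 0 = max (E - t) 0 →
    (caps.foldl
      (fun (st : Int × List Int) shell =>
        if st.1 > 0 then
          let x := min shell st.1
          (st.1 - x, st.2 ++ [x])
        else (st.1, st.2 ++ [0]))
      (e, acc)).2
    = acc ++ (pvOffs t caps).map (fun p => max 0 (min p.1 (E - p.2))) := by
  induction caps with
  | nil => intro e E t acc h; simp [pvOffs]
  | cons c cs ih =>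
    intro e E t acc h
    have hc : 0 < c := hpos c (by simp)
    have hpos' : ∀ d ∈ cs, 0 < d := fun d hd => hpos d (by simp [hd])
    simp only [List.foldl_cons, pvOffs, List.map_cons]
    by_cases he : e > 0
    · rw [if_pos he]
      have := ih hpos' (e - min c e) E (t + c) (acc ++ [min c e]) (by omega)
      simp only at this
      have hx : min c e = max 0 (min c (E - t)) := by omega
      rw [this, List.append_assoc, ← hx]
      simp
    · rw [if_neg he]
      have := ih hpos' e E (t + c) (acc ++ [0]) (by omega)
      simp only at this
      have hx : (0 : Int) = max 0 (min c (E - t)) := by omega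
      rw [this, List.append_assoc, ← hx]
      simp

-- ===== VERDICT (by name: the statement is the Claim_ definition above) =====
theorem get_electron_shells_spec : Claim_equal_get_electron_shells := by
  intro e _
  unfold Spec_get_electron_shells get_electron_shells
  rw [pvFoldA_eq [2, 8, 18, 32, 32, 18, 8] (by intro c hc; fin_cases hc <;> norm_num) e e 0 [] (by omega)]
  simp [get_electron_shells_alt, pvOffs, List.foldl, List.zip, List.zipWith]
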